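-- pv_equiv track=rewrite | github.com/brunolinsalves/ofertasmagicas | app.py | get_file_info
-- ===== SOURCE A (Python) =====
-- def get_file_info(filepath, lines):
--     header_begin = False
--     header_end   = False
--     retorno = {'filepath': filepath}
--     content = ''
--     for line in lines:
--         if line.startswith('---'):
--             if not header_begin:
--                 header_begin = True
--                 continue
--             else:
--                 header_end = True
--                 continue
--         if not header_end:
--             tokens = line.split(':')
--             retorno[cleanup_chars(tokens[0])] = cleanup_chars(' '.join( tokens[1:len(tokens)] ))
--         else:
--             content += line
--     retorno['conteudo'] = content
--     return retorno
--
-- def cleanup_chars(param):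
--     param = param.strip()
--     param = param.replace('"', '')
--     return param
-- ===== SOURCE B (Python) =====
-- def cleanup_chars(param):
--     return param.strip().replace('"', '')
--
-- def get_file_info(filepath, lines):
--     # boundary = index of the second '---' fence (or len(lines) if fewer than two)
--     fences = [i for i, l in enumerate(lines) if l.startswith('---')]
--     boundary = fences[1] if len(fences) >= 2 else len(lines)
--     retorno = {'filepath': filepath}
--     for line in lines[:boundary]:
--         if not line.startswith('---'):
--             tokens = line.split(':')
--             retorno[cleanup_chars(tokens[0])] = cleanup_chars(' '.join(tokens[1:]))
--     retorno['conteudo'] = ''.join(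
--         l for l in lines[boundary:] if not l.startswith('---'))
--     return retorno
-- ===== Notes on version B (the rewrite author's own statement) =====
-- stated objective: alternative
-- what changed: A's single stateful loop with header_begin/header_end flags is replaced by first computing the index of the second '---' fence (or len(lines)), then two independent passes: a header pass over lines[:boundary] and a body join over the non-fence lines of lines[boundary:].
import Mathlib
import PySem

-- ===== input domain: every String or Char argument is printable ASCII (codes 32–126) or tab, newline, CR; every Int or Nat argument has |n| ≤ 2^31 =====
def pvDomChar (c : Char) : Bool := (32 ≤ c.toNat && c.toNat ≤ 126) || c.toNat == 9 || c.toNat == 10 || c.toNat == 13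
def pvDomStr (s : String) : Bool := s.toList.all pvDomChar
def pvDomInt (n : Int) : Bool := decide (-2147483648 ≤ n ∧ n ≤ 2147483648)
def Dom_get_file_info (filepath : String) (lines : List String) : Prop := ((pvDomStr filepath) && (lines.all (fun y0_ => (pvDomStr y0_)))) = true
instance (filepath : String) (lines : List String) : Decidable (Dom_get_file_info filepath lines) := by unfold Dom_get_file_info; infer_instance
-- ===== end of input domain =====

-- B replaces A's single stateful loop by a fence-boundary computation plus two independent
-- passes (header slice, body slice); same return value, same cost (objective: alternative).

-- ===== PORT A =====
def cleanup_chars (param : String) : String :=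
  PySem.Str.replace (PySem.Str.strip param) "\"" ""

-- the body of A's `for line in lines` loop, over state (header_begin, header_end, retorno, content);
-- line.split(':') is exact as split? with nonempty sep (getD [] is never taken)
def aStep (st : Bool × Bool × PySem.Dict String String × String) (line : String) :
    Bool × Bool × PySem.Dict String String × String :=
  let (hb, he, retorno, content) := st
  if PySem.Str.startswith line "---" then
    if !hb then (true, he, retorno, content)
    else (hb, true, retorno, content)
  else if !he then
    let tokens := (PySem.Str.split? line ":").getD []
    (hb, he,
      retorno.insert (cleanup_chars (tokens.headD ""))
        (cleanup_chars (PySem.Str.join " " (tokens.drop 1))),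
      content)
  else (hb, he, retorno, content ++ line)

def get_file_info (filepath : String) (lines : List String) : List (String × String) :=
  let st := lines.foldl aStep
    (false, false, PySem.Dict.ofList [("filepath", filepath)], "")
  ((st.2.2.1).insert "conteudo" st.2.2.2).items

-- ===== PORT B =====
-- the body of B's header loop (skip fences, otherwise token-parse into the dict)
def bStep (d : PySem.Dict String String) (line : String) : PySem.Dict String String :=
  if PySem.Str.startswith line "---" then d
  else
    let tokens := (PySem.Str.split? line ":").getD []
    d.insert (cleanup_chars (tokens.headD ""))
      (cleanup_chars (PySem.Str.join " " (tokens.drop 1)))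

def get_file_info_alt (filepath : String) (lines : List String) : List (String × String) :=
  let fences := ((PySem.List.enumerate lines).filter
    (fun p => PySem.Str.startswith p.2 "---")).map (·.1)
  let boundary : Int := match fences with
    | _ :: b :: _ => b
    | _ => (lines.length : Int)
  let retorno := (PySem.List.slice lines none (some boundary)).foldl bStep
    (PySem.Dict.ofList [("filepath", filepath)])
  let body := (PySem.List.slice lines (some boundary) none).filter
    (fun l => !PySem.Str.startswith l "---")
  (retorno.insert "conteudo" (PySem.Str.join "" body)).items

-- ===== PRECONDITION & SPEC =====
def Spec_get_file_info (filepath : String) (lines : List String) (out : List (String × String)) : Prop := out = get_file_info_alt filepath lines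
instance (filepath : String) (lines : List String) (out : List (String × String)) : Decidable (Spec_get_file_info filepath lines out) := by unfold Spec_get_file_info; infer_instance

-- ===== CLAIM (what is proved, stated in full; the proofs are below) =====
def Claim_equal_get_file_info : Prop := ∀ (filepath : String) (lines : List String), Dom_get_file_info filepath lines → Spec_get_file_info filepath lines (get_file_info filepath lines)

-- ===== LEMMAS AND PROOFS =====

-- index of the first '---' line (= length if none)
def f1 : List String → Nat
  | [] => 0
  | l :: ls => if PySem.Str.startswith l "---" then 0 else f1 ls + 1

-- index of the second '---' line (= length if fewer than two)
def f2 : List String → Nat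
  | [] => 0
  | l :: ls => if PySem.Str.startswith l "---" then f1 ls + 1 else f2 ls + 1

-- concatenation of the non-fence lines
def joinF (ls : List String) : String :=
  PySem.Str.join "" (ls.filter (fun l => !PySem.Str.startswith l "---"))

theorem join_empty_cons (x : String) (xs : List String) :
    PySem.Str.join "" (x :: xs) = x ++ PySem.Str.join "" xs := by
  apply String.toList_inj.mp
  simp only [PySem.Str.toList_join, List.map_cons, String.toList_append]
  cases xs with
  | nil => simp [PySem.Chars.join_nil, PySem.Chars.join_singleton]
  | cons y ys => simp [PySem.Chars.join_cons_cons]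

theorem joinF_nil : joinF [] = "" := by
  apply String.toList_inj.mp
  simp [joinF, PySem.Str.toList_join, PySem.Chars.join_nil]

theorem joinF_cons (l : String) (ls : List String) :
    joinF (l :: ls) =
      (if PySem.Str.startswith l "---" then joinF ls else l ++ joinF ls) := by
  by_cases hf : PySem.Chars.startswith l.toList ['-','-','-'] = true <;>
    simp [joinF, List.filter, hf, join_empty_cons]

theorem phase2 (ls : List String) (hb : Bool) (ret : PySem.Dict String String) (c : String) :
    (ls.foldl aStep (hb, true, ret, c)).2.2 = (ret, c ++ joinF ls) := by
  induction ls generalizing hb c with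
  | nil => simp [joinF_nil]
  | cons l ls ih =>
    by_cases hf : PySem.Chars.startswith l.toList ['-','-','-'] = true
    · cases hb <;> simp [List.foldl, aStep, hf, ih, joinF_cons]
    · simp [List.foldl, aStep, hf, ih, joinF_cons, String.append_assoc]

theorem phase1 (ls : List String) (ret : PySem.Dict String String) (c : String) :
    (ls.foldl aStep (true, false, ret, c)).2.2 =
      ((ls.take (f1 ls)).foldl bStep ret, c ++ joinF (ls.drop (f1 ls))) := by
  induction ls generalizing ret c with
  | nil => simp [f1, joinF_nil]
  | cons l ls ih =>
    by_cases hf : PySem.Chars.startswith l.toList ['-','-','-'] = true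
    · simp [List.foldl, aStep, hf, f1, phase2, joinF_cons]
    · simp [List.foldl, aStep, hf, f1, ih, bStep]

theorem phase0 (ls : List String) (ret : PySem.Dict String String) (c : String) :
    (ls.foldl aStep (false, false, ret, c)).2.2 =
      ((ls.take (f2 ls)).foldl bStep ret, c ++ joinF (ls.drop (f2 ls))) := by
  induction ls generalizing ret c with
  | nil => simp [f2, joinF_nil]
  | cons l ls ih =>
    by_cases hf : PySem.Chars.startswith l.toList ['-','-','-'] = true
    · simp [List.foldl, aStep, hf, f2, phase1, bStep]
    · simp [List.foldl, aStep, hf, f2, ih, bStep]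

def gFences (s : Int) (ls : List String) : List Int :=
  ((PySem.List.enumerate ls s).filter (fun p => PySem.Str.startswith p.2 "---")).map (·.1)

theorem gFences_cons (s : Int) (l : String) (ls : List String) :
    gFences s (l :: ls) =
      (if PySem.Chars.startswith l.toList ['-','-','-'] = true then s :: gFences (s + 1) ls
       else gFences (s + 1) ls) := by
  by_cases hf : PySem.Chars.startswith l.toList ['-','-','-'] = true <;>
    simp [gFences, PySem.List.enumerate_cons, hf]

theorem gFences_head (s : Int) (ls : List String) :
    (match gFences s ls with | b :: _ => b | [] => s + ls.length) = s + (f1 ls : Int) := by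
  induction ls generalizing s with
  | nil => simp [gFences, f1]
  | cons l ls ih =>
    rw [gFences_cons]
    by_cases hf : PySem.Chars.startswith l.toList ['-','-','-'] = true
    · simp [hf, f1]
    · rw [if_neg hf]
      have h := ih (s + 1)
      rcases hg : gFences (s + 1) ls with _ | ⟨b, rest⟩ <;>
      · rw [hg] at h
        simp [f1, hf] at h ⊢
        omega

theorem gFences_second (s : Int) (ls : List String) :
    (match gFences s ls with | _ :: b :: _ => b | _ => s + ls.length) = s + (f2 ls : Int) := by
  induction ls generalizing s with
  | nil => simp [gFences, f2]
  | cons l ls ih =>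
    rw [gFences_cons]
    by_cases hf : PySem.Chars.startswith l.toList ['-','-','-'] = true
    · rw [if_pos hf]
      have h := gFences_head (s + 1) ls
      rcases hg : gFences (s + 1) ls with _ | ⟨b, rest⟩ <;>
      · rw [hg] at h
        simp [f2, hf] at h ⊢
        omega
    · rw [if_neg hf]
      have h := ih (s + 1)
      rcases hg : gFences (s + 1) ls with _ | ⟨b, _ | ⟨b2, r2⟩⟩ <;>
      · rw [hg] at h
        simp [f2, hf] at h ⊢
        omega

-- ===== VERDICT (by name: the statement is the Claim_ definition above) =====
theorem get_file_info_spec : Claim_equal_get_file_info := by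
  intro filepath lines _
  unfold Spec_get_file_info get_file_info get_file_info_alt
  dsimp only
  have hfe : ((PySem.List.enumerate lines).filter
      (fun p => PySem.Str.startswith p.2 "---")).map (·.1) = gFences 0 lines := rfl
  rw [hfe]
  have hb := gFences_second 0 lines
  simp only [zero_add] at hb
  rw [hb]
  rw [PySem.List.slice_to_natCast, PySem.List.slice_from_natCast]
  rw [phase0]
  simp [joinF]
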